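-- pv_equiv track=rewrite | github.com/Pppp1116/Arixa | astra/lexer.py | _advance_pos
-- ===== SOURCE A (Python) =====
-- def _advance_pos(text: str, line: int, col: int) -> tuple[int, int]:
--     for ch in text:
--         if ch == "\n":
--             line += 1
--             col = 1
--         else:
--             col += 1
--     return line, col
-- ===== SOURCE B (Python) =====
-- def _advance_pos(text: str, line: int, col: int) -> tuple[int, int]:
--     nl = text.count("\n")
--     if nl == 0:
--         return line, col + len(text)
--     return line + nl, len(text) - text.rfind("\n")
-- ===== Notes on version B (the rewrite author's own statement) =====
-- stated objective: simpler
-- what changed: Replaces the per-character loop with running line/col counters by a closed-form branch on text.count('\n') and text.rfind('\n'): no newline means col + len(text), otherwise line + nl and len(text) - rfind.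
import Mathlib
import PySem

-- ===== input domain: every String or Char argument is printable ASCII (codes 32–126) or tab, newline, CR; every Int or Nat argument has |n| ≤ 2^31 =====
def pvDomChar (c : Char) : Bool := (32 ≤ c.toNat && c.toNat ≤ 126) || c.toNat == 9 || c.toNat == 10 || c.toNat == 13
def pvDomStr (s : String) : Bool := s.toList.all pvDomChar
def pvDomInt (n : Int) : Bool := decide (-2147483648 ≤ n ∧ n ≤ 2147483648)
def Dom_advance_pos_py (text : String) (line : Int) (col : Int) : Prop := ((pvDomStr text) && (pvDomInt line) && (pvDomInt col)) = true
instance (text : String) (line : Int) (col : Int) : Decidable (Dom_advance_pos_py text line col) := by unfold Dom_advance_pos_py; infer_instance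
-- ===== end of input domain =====

-- B replaces A's per-character loop with a closed-form branch on the newline count
-- and the position of the last newline (objective: simpler).

-- ===== PORT A =====
-- literal port of A: fold over the characters, updating (line, col) per character
def advance_pos_py (text : String) (line : Int) (col : Int) : Int × Int :=
  text.toList.foldl
    (fun s ch => if ch = '\n' then (s.1 + 1, (1 : Int)) else (s.1, s.2 + 1))
    (line, col)

-- ===== PORT B =====
-- hand port of Python's text.rfind("\n") (single character needle): index of the
-- last '\n' (scan the reversed character list), -1 if absent — exact on all inputs
def pvRfindNl (l : List Char) : Int :=
  match l.reverse.findIdx? (· = '\n') with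
  | some j => (l.length : Int) - 1 - (j : Int)
  | none => -1

def advance_pos_py_alt (text : String) (line : Int) (col : Int) : Int × Int :=
  let l := text.toList
  let nl := l.count '\n'
  if nl = 0 then (line, col + (l.length : Int))
  else (line + (nl : Int), (l.length : Int) - pvRfindNl l)

-- ===== PRECONDITION & SPEC =====
def Spec_advance_pos_py (text : String) (line : Int) (col : Int) (out : Int × Int) : Prop := out = advance_pos_py_alt text line col
instance (text : String) (line : Int) (col : Int) (out : Int × Int) : Decidable (Spec_advance_pos_py text line col out) := by unfold Spec_advance_pos_py; infer_instance

-- ===== CLAIM (what is proved, stated in full; the proofs are below) =====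
def Claim_equal_advance_pos_py : Prop := ∀ (text : String) (line : Int) (col : Int), Dom_advance_pos_py text line col → Spec_advance_pos_py text line col (advance_pos_py text line col)

-- ===== LEMMAS AND PROOFS =====

-- A's loop over a character list equals B's closed form, by induction from the back
lemma pv_fold_closed (l : List Char) (line col : Int) :
    l.foldl (fun s ch => if ch = '\n' then (s.1 + 1, (1 : Int)) else (s.1, s.2 + 1)) (line, col)
    = if l.count '\n' = 0 then (line, col + (l.length : Int))
      else (line + (l.count '\n' : Int), (l.length : Int) - pvRfindNl l) := by
  induction l using List.reverseRecOn with
  | nil => simp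
  | append_singleton l c ih =>
    rw [List.foldl_append, ih]
    by_cases hc : c = '\n'
    · subst hc
      by_cases h0 : l.count '\n' = 0 <;>
        simp [pvRfindNl, List.findIdx?_cons, h0, List.count_append] <;> omega
    · have hcount : (l ++ [c]).count '\n' = l.count '\n' := by
        simp [List.count_append, hc]
      by_cases h0 : l.count '\n' = 0
      · simp [h0, hcount, hc]
        push_cast; ring
      · have hmem : '\n' ∈ l.reverse := by
          simp; exact List.count_pos_iff.mp (by omega)
        obtain ⟨j, hj⟩ : ∃ j, l.reverse.findIdx? (· = '\n') = some j := by
          cases hfi : l.reverse.findIdx? (· = '\n') with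
          | some j => exact ⟨j, rfl⟩
          | none =>
            rw [List.findIdx?_eq_none_iff] at hfi
            exact absurd (hfi '\n' hmem) (by simp)
        simp [h0, hcount, hc, pvRfindNl, List.findIdx?_cons, hj]
        omega

-- ===== VERDICT (by name: the statement is the Claim_ definition above) =====
theorem advance_pos_py_spec : Claim_equal_advance_pos_py := by
  intro text line col _
  unfold Spec_advance_pos_py advance_pos_py advance_pos_py_alt
  exact pv_fold_closed text.toList line col
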